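-- pv_equiv track=rewrite | github.com/NeuralBlitz/fishstick | fishstick/nlp/sentiment.py | normalize_hashtag
-- ===== SOURCE A (Python) =====
-- def normalize_hashtag(hashtag: str) -> str:
--     """Normalize hashtag by removing # and splitting camelCase."""
--     text = hashtag.lstrip("#")
--
--     words = []
--     current_word = text[0] if text else ""
--
--     for i in range(1, len(text)):
--         if text[i].isupper() and text[i - 1].islower():
--             words.append(current_word)
--             current_word = text[i]
--         elif text[i].isupper() and i + 1 < len(text) and text[i + 1].islower():
--             words.append(current_word)
--             current_word = text[i]
--         else:
--             current_word += text[i]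
--     words.append(current_word)
--
--     return " ".join(words).lower()
-- ===== SOURCE B (Python) =====
-- def normalize_hashtag(hashtag: str) -> str:
--     """Normalize hashtag by removing # and splitting camelCase.
--
--     Two-pass: collect word-start indices first, then slice."""
--     text = hashtag.lstrip("#")
--     if not text:
--         return ""
--     n = len(text)
--     starts = [0]
--     for i in range(1, n):
--         if text[i].isupper() and (text[i - 1].islower()
--                                   or (i + 1 < n and text[i + 1].islower())):
--             starts.append(i)
--     starts.append(n)
--     words = [text[a:b] for a, b in zip(starts, starts[1:])]
--     return " ".join(words).lower()
-- ===== Notes on version B (the rewrite author's own statement) =====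
-- stated objective: faster
-- what changed: B replaces A's accumulator loop that grows a current word character by character (quadratic string concatenation) with a two-pass index scheme: one pass collects word-start indices, then the words are produced by slicing between consecutive starts.
import Mathlib
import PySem

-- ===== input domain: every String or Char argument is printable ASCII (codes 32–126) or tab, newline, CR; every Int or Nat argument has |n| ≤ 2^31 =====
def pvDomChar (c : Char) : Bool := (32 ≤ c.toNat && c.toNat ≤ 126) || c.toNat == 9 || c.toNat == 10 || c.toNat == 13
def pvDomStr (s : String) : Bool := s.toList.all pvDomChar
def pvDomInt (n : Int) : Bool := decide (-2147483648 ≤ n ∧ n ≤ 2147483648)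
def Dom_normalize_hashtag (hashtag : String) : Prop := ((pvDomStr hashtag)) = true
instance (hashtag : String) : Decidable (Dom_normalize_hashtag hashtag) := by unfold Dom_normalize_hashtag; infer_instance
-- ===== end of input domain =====

-- B replaces A's grow-a-current-word accumulator loop by a two-pass scheme (collect
-- word-start indices, then slice between consecutive starts); same return value.

-- ===== PORT A =====
-- loop body of A's `for i in range(1, len(text))` (branch order as in the Python)
def pvAStep (t : List Char) (st : List (List Char) × List Char) (i : Nat) :
    List (List Char) × List Char :=
  if PySem.Chars.isupper (t.getD i ' ') && PySem.Chars.islower (t.getD (i - 1) ' ') then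
    (st.1 ++ [st.2], [t.getD i ' '])
  else if PySem.Chars.isupper (t.getD i ' ') &&
      (decide (i + 1 < t.length) && PySem.Chars.islower (t.getD (i + 1) ' ')) then
    (st.1 ++ [st.2], [t.getD i ' '])
  else
    (st.1, st.2 ++ [t.getD i ' '])

def normalize_hashtag (hashtag : String) : String :=
  -- text = hashtag.lstrip("#") : dropping leading '#' is exact for lstrip with a 1-char set
  let text := hashtag.toList.dropWhile (· == '#')
  let cur0 : List Char := match text with | [] => [] | c :: _ => [c]
  let st := (List.range' 1 (text.length - 1)).foldl (pvAStep text) ([], cur0)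
  let words := st.1 ++ [st.2]
  String.ofList (PySem.Chars.lower (PySem.Chars.join [' '] words))

-- ===== PORT B =====
-- B's word-boundary test at index i
def pvCond (t : List Char) (i : Nat) : Bool :=
  PySem.Chars.isupper (t.getD i ' ') &&
    (PySem.Chars.islower (t.getD (i - 1) ' ') ||
      (decide (i + 1 < t.length) && PySem.Chars.islower (t.getD (i + 1) ' ')))

-- loop body of B's start-index scan
def pvBStep (t : List Char) (acc : List Nat) (i : Nat) : List Nat :=
  if pvCond t i then acc ++ [i] else acc

def normalize_hashtag_alt (hashtag : String) : String :=
  let text := hashtag.toList.dropWhile (· == '#')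
  if text.isEmpty then "" else
    let n := text.length
    let starts := (List.range' 1 (n - 1)).foldl (pvBStep text) [0] ++ [n]
    -- text[a:b] with 0 ≤ a ≤ b : drop/take (PySem.List.slice_natCast)
    let words := (starts.zip starts.tail).map (fun p => (text.drop p.1).take (p.2 - p.1))
    String.ofList (PySem.Chars.lower (PySem.Chars.join [' '] words))

-- ===== PRECONDITION & SPEC =====
def Spec_normalize_hashtag (hashtag : String) (out : String) : Prop := out = normalize_hashtag_alt hashtag
instance (hashtag : String) (out : String) : Decidable (Spec_normalize_hashtag hashtag out) := by unfold Spec_normalize_hashtag; infer_instance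

-- ===== CLAIM (what is proved, stated in full; the proofs are below) =====
def Claim_equal_normalize_hashtag : Prop := ∀ (hashtag : String), Dom_normalize_hashtag hashtag → Spec_normalize_hashtag hashtag (normalize_hashtag hashtag)

-- ===== LEMMAS AND PROOFS =====

-- A's two split branches together fire exactly on pvCond
theorem pvAStep_eq (t : List Char) (st : List (List Char) × List Char) (i : Nat) :
    pvAStep t st i =
      if pvCond t i then (st.1 ++ [st.2], [t.getD i ' '])
      else (st.1, st.2 ++ [t.getD i ' ']) := by
  unfold pvAStep pvCond
  cases hu : PySem.Chars.isupper (t.getD i ' ') <;>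
    cases hp : PySem.Chars.islower (t.getD (i - 1) ' ') <;>
      cases hq : (decide (i + 1 < t.length) && PySem.Chars.islower (t.getD (i + 1) ' ')) <;>
        simp

-- consecutive pairs of a list ending in [a, b]
theorem pv_zip_tail_concat (s : List Nat) (a b : Nat) :
    (s ++ [a] ++ [b]).zip (s ++ [a] ++ [b]).tail
      = (s ++ [a]).zip (s ++ [a]).tail ++ [(a, b)] := by
  induction s with
  | nil => simp
  | cons x s ih =>
    cases s with
    | nil => simp
    | cons y s' =>
      simpa [List.zip_cons_cons] using congrArg (List.cons (x, y)) ih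

theorem pv_drop_take_one (t : List Char) (j : Nat) (h : j < t.length) :
    (t.drop j).take 1 = [t.getD j ' '] := by
  rw [List.drop_eq_getElem_cons h, List.take_succ_cons, List.take_zero,
    List.getD_eq_getElem?_getD, List.getElem?_eq_getElem h, Option.getD_some]

theorem pv_loop_inv (t : List Char) (h0 : 0 < t.length) :
    ∀ k, k + 1 ≤ t.length →
      ∃ s L, (List.range' 1 k).foldl (pvBStep t) [0] = s ++ [L] ∧ L ≤ k ∧
        (List.range' 1 k).foldl (pvAStep t) ([], [t.getD 0 ' ']) =
          (((s ++ [L]).zip (s ++ [L]).tail).map (fun p => (t.drop p.1).take (p.2 - p.1)),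
            (t.drop L).take (k + 1 - L)) := by
  intro k
  induction k with
  | zero =>
    intro _
    refine ⟨[], 0, rfl, le_refl 0, ?_⟩
    have h1 := pv_drop_take_one t 0 h0
    rw [List.drop_zero] at h1
    simp [h1]
  | succ k ih =>
    intro hk
    obtain ⟨s, L, hb, ha, hL⟩ := ih (by omega)
    have hrange : List.range' 1 (k + 1) = List.range' 1 k ++ [k + 1] := by
      rw [List.range'_concat]
      simp [Nat.add_comm]
    have hlt : k + 1 < t.length := by omega
    rw [hrange, List.foldl_append, List.foldl_append, hb, hL]
    simp only [List.foldl_cons, List.foldl_nil, pvAStep_eq, pvBStep]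
    by_cases hc : pvCond t (k + 1) = true
    · -- boundary at k+1: A flushes current_word, B records a start
      rw [if_pos hc, if_pos hc]
      refine ⟨s ++ [L], k + 1, by simp, le_refl _, ?_⟩
      rw [pv_zip_tail_concat, List.map_append]
      have h1 : (t.drop (k + 1)).take (k + 1 + 1 - (k + 1)) = [t.getD (k + 1) ' '] := by
        rw [show k + 1 + 1 - (k + 1) = 1 from by omega, pv_drop_take_one t (k + 1) hlt]
      rw [h1]
      simp
    · -- no boundary: A grows current_word, B's starts are unchanged
      rw [if_neg hc, if_neg hc]
      refine ⟨s, L, rfl, by omega, ?_⟩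
      have hcur : (t.drop L).take (k + 1 + 1 - L)
          = (t.drop L).take (k + 1 - L) ++ [t.getD (k + 1) ' '] := by
        rw [show k + 1 + 1 - L = (k + 1 - L) + 1 from by omega, List.take_add_one]
        have h2 : (t.drop L)[k + 1 - L]? = some (t.getD (k + 1) ' ') := by
          rw [List.getElem?_drop, show L + (k + 1 - L) = k + 1 from by omega,
            List.getElem?_eq_getElem hlt, List.getD_eq_getElem?_getD,
            List.getElem?_eq_getElem hlt, Option.getD_some]
        rw [h2, Option.toList_some]
      rw [hcur]

-- ===== VERDICT (by name: the statement is the Claim_ definition above) =====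
theorem normalize_hashtag_spec : Claim_equal_normalize_hashtag := by
  intro hashtag _
  unfold Spec_normalize_hashtag normalize_hashtag normalize_hashtag_alt
  cases ht : hashtag.toList.dropWhile (· == '#') with
  | nil => simp [PySem.Chars.lower]
  | cons c rest =>
    simp only [List.isEmpty_cons, if_neg Bool.false_ne_true]
    have h0 : 0 < (c :: rest).length := by simp
    obtain ⟨s, L, hb, hL, ha⟩ :=
      pv_loop_inv (c :: rest) h0 ((c :: rest).length - 1) (by omega)
    have hcur0 : [c] = [(c :: rest).getD 0 ' '] := by simp
    rw [hcur0, ha, hb]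
    have hn : (c :: rest).length - 1 + 1 - L = (c :: rest).length - L := by omega
    rw [hn, List.append_assoc s [L] [(c :: rest).length],
      ← List.append_assoc s [L] [(c :: rest).length], pv_zip_tail_concat, List.map_append]
    simp
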